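-- pv_equiv track=rewrite | github.com/EDA-Teaching-RJH/assignment-foundations-of-programming-Gonza611 | fleet_manager.py | calculate_payroll
-- ===== SOURCE A (Python) =====
-- def calculate_payroll(ranks):
--     total = 0
--
--     for rank in ranks:
--         if rank == "Captain":
--             total += 1000
--         elif rank == "Commander":
--             total += 800
--         elif rank == "Lt. Commander":
--             total += 600
--         elif rank == "Lieutenant":
--             total += 400
--         elif rank == "Ensign":
--             total += 200
--
--     return total
-- ===== SOURCE B (Python) =====
-- RATES = {"Captain": 1000, "Commander": 800, "Lt. Commander": 600,
--          "Lieutenant": 400, "Ensign": 200}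
--
-- def calculate_payroll(ranks):
--     return sum(rate * ranks.count(rank) for rank, rate in RATES.items())
-- ===== Notes on version B (the rewrite author's own statement) =====
-- stated objective: alternative
-- what changed: Replaces the per-element 5-way if/elif accumulation with a rate-table traversal: iterate over the five (rank, rate) pairs and sum rate * ranks.count(rank), so the loop is over the rate table, not the input list.
import Mathlib
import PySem

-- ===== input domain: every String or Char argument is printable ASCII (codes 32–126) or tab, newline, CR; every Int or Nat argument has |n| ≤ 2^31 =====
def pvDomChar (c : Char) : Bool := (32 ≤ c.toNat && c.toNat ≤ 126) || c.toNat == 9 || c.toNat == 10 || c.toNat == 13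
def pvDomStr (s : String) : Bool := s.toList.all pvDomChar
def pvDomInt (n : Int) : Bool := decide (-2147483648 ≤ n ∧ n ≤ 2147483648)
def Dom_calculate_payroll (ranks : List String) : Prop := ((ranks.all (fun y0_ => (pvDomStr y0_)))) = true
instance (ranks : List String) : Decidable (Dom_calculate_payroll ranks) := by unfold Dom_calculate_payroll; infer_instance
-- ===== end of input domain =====

-- B replaces A's per-element if/elif loop with a sum over the five-entry rate table (rate * count); alternative decomposition, same cost.


-- ===== PORT A =====
def calculate_payroll (ranks : List String) : Int :=
  ranks.foldl (fun total rank =>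
    if rank == "Captain" then total + 1000
    else if rank == "Commander" then total + 800
    else if rank == "Lt. Commander" then total + 600
    else if rank == "Lieutenant" then total + 400
    else if rank == "Ensign" then total + 200
    else total) 0

-- ===== PORT B =====
def pvRates : List (String × Int) :=
  [("Captain", 1000), ("Commander", 800), ("Lt. Commander", 600),
   ("Lieutenant", 400), ("Ensign", 200)]

def calculate_payroll_alt (ranks : List String) : Int :=
  (pvRates.map (fun p => p.2 * (PySem.List.count ranks p.1 : Int))).sum

-- ===== PRECONDITION & SPEC =====
def Spec_calculate_payroll (ranks : List String) (out : Int) : Prop := out = calculate_payroll_alt ranks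
instance (ranks : List String) (out : Int) : Decidable (Spec_calculate_payroll ranks out) := by unfold Spec_calculate_payroll; infer_instance

-- ===== CLAIM (what is proved, stated in full; the proofs are below) =====
def Claim_equal_calculate_payroll : Prop := ∀ (ranks : List String), Dom_calculate_payroll ranks → Spec_calculate_payroll ranks (calculate_payroll ranks)

-- ===== LEMMAS AND PROOFS =====

-- A's foldl shifts its accumulator additively.
theorem pvA_foldl_shift (ranks : List String) (a : Int) :
    ranks.foldl (fun total rank =>
      if rank == "Captain" then total + 1000
      else if rank == "Commander" then total + 800
      else if rank == "Lt. Commander" then total + 600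
      else if rank == "Lieutenant" then total + 400
      else if rank == "Ensign" then total + 200
      else total) a
    = a + calculate_payroll ranks := by
  induction ranks generalizing a with
  | nil => simp [calculate_payroll]
  | cons r rs ih =>
    simp only [calculate_payroll, List.foldl_cons]
    rw [ih, ih]
    split_ifs <;> ring

theorem pvB_cons (r : String) (rs : List String) :
    calculate_payroll_alt (r :: rs)
    = (if r == "Captain" then (1000 : Int)
       else if r == "Commander" then 800
       else if r == "Lt. Commander" then 600
       else if r == "Lieutenant" then 400
       else if r == "Ensign" then 200
       else 0) + calculate_payroll_alt rs := by
  simp only [calculate_payroll_alt, pvRates, List.map, List.sum_cons, List.sum_nil,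
    PySem.List.count_eq, List.count_cons]
  by_cases h1 : r = "Captain" <;> by_cases h2 : r = "Commander" <;>
    by_cases h3 : r = "Lt. Commander" <;> by_cases h4 : r = "Lieutenant" <;>
    by_cases h5 : r = "Ensign" <;>
    simp_all <;> ring

-- ===== VERDICT (by name: the statement is the Claim_ definition above) =====
theorem pvAB_eq (ranks : List String) : calculate_payroll ranks = calculate_payroll_alt ranks := by
  induction ranks with
  | nil => decide
  | cons r rs ih =>
    rw [pvB_cons, ← ih]
    simp only [calculate_payroll, List.foldl_cons]
    rw [pvA_foldl_shift]
    split_ifs <;> simp [calculate_payroll]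

theorem calculate_payroll_spec : Claim_equal_calculate_payroll :=
  fun ranks _ => pvAB_eq ranks
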